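-- pv_equiv track=rewrite | github.com/chuanjieguo/UrlAnalyze | IpUtil.py | dec2Ip
-- ===== SOURCE A (Python) =====
-- def dec2Ip(dec):
--     '''
--     十进制转字符IP
--     :param dec:
--     :return:
--     '''
--     ip = ''
--     t = 2 ** 8
--     for _ in range(4):
--         v = dec % t
--         ip = '.' + str(v) + ip
--         dec = dec // t
--     ip = ip[1:]
--     return ip
-- ===== SOURCE B (Python) =====
-- def dec2Ip(dec):
--     '''
--     十进制转字符IP
--     :param dec:
--     :return:
--     '''
--     return '.'.join(str((dec // 256 ** i) % 256) for i in (3, 2, 1, 0))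
-- ===== Notes on version B (the rewrite author's own statement) =====
-- stated objective: idiomatic
-- what changed: Replaces the accumulator loop that repeatedly floor-divides dec and prepends a dot plus the str of the remainder with a single dot-join over per-index byte extraction from the original argument.
import Mathlib
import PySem

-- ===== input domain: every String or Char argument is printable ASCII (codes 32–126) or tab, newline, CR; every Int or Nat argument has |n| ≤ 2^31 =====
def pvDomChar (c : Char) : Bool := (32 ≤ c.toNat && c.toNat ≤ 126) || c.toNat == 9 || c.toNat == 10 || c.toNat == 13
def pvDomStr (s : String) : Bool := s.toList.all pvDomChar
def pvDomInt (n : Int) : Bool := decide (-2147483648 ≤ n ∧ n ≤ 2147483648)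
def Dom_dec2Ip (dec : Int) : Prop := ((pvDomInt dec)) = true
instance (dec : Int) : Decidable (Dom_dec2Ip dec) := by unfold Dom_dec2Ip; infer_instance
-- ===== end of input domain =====

-- B replaces A's shrinking-accumulator loop (dec //= 256, prepend '.'+str(v)) with a
-- '.'-join over direct per-index byte extraction (dec // 256**i) % 256 for i = 3,2,1,0.

-- ===== PORT A =====
-- Strings are handled as List Char (PySem.Chars) and wrapped once at the end.
def dec2Ip (dec : Int) : String :=
  let t : Int := 2 ^ 8
  let st := (PySem.List.pyRange 0 4 1).foldl
    (fun (st : List Char × Int) _ =>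
      let v := PySem.Int.mod st.2 t
      (('.' :: PySem.Int.toChars v) ++ st.1, PySem.Int.floordiv st.2 t))
    ([], dec)
  String.ofList (PySem.Chars.slice st.1 (some 1) none)   -- ip[1:]

-- ===== PORT B =====
def dec2Ip_alt (dec : Int) : String :=
  String.ofList (PySem.Chars.join ['.']
    (([3, 2, 1, 0] : List Nat).map
      (fun i => PySem.Int.toChars (PySem.Int.mod (PySem.Int.floordiv dec ((256 : Int) ^ i)) 256))))

-- ===== PRECONDITION & SPEC =====
def Spec_dec2Ip (dec : Int) (out : String) : Prop := out = dec2Ip_alt dec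
instance (dec : Int) (out : String) : Decidable (Spec_dec2Ip dec out) := by unfold Spec_dec2Ip; infer_instance

-- ===== CLAIM (what is proved, stated in full; the proofs are below) =====
def Claim_equal_dec2Ip : Prop := ∀ (dec : Int), Dom_dec2Ip dec → Spec_dec2Ip dec (dec2Ip dec)

-- ===== LEMMAS AND PROOFS =====

-- ===== VERDICT (by name: the statement is the Claim_ definition above) =====
theorem dec2Ip_spec : Claim_equal_dec2Ip := by
  intro dec _
  show dec2Ip dec = dec2Ip_alt dec
  have hr : PySem.List.pyRange 0 4 1 = [0, 1, 2, 3] := by decide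
  have e2 : dec / 256 / 256 = dec / 65536 := by
    rw [Int.ediv_ediv_of_nonneg] <;> norm_num
  have e3 : dec / 65536 / 256 = dec / 16777216 := by
    rw [Int.ediv_ediv_of_nonneg] <;> norm_num
  simp only [dec2Ip, dec2Ip_alt, hr, List.foldl, List.map,
    PySem.Chars.slice_eq_listSlice, PySem.List.slice_from_one, PySem.Chars.join]
  norm_num [List.intercalate, e2, e3]
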